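-- pv_equiv track=rewrite | github.com/AllenInstitute/AllenSDK | brain_observatory/behavior/trials_processing.py | get_image_info_from_trial
-- ===== SOURCE A (Python) =====
-- def get_image_info_from_trial(trial_log, ti):
--
--     if ti == -1:
--         raise RuntimeError('Should not have been possible')
--
--     if len(trial_log[ti]["stimulus_changes"]) == 1:
--
--         ((from_group, from_name, ),
--          (to_group, to_name),
--          _, _) = trial_log[ti]["stimulus_changes"][0]
--
--         return from_group, from_name, to_group, to_name
--     else:
--
--         (_, _,
--          prev_group,
--          prev_name) = get_image_info_from_trial(trial_log, ti - 1)
--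
--         return prev_group, prev_name, prev_group, prev_name
-- ===== SOURCE B (Python) =====
-- def get_image_info_from_trial(trial_log, ti):
--     if ti == -1:
--         raise RuntimeError('Should not have been possible')
--     start = ti if ti >= 0 else ti + len(trial_log)
--     hit = next((j for j in reversed(range(start + 1))
--                 if len(trial_log[j]["stimulus_changes"]) == 1), None)
--     if hit is None:
--         raise RuntimeError('Should not have been possible')
--     (from_group, from_name), (to_group, to_name), _, _ = \
--         trial_log[hit]["stimulus_changes"][0]
--     if hit == start:
--         return from_group, from_name, to_group, to_name
--     return to_group, to_name, to_group, to_name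
-- ===== Notes on version B (the rewrite author's own statement) =====
-- stated objective: alternative
-- what changed: Replaces A's backward recursion (which re-projects and duplicates the previous call's last pair at every level) with: normalise the index once, find the nearest qualifying trial index with a single find-first scan over a precomputed descending range, then one unpack and a hit==start comparison to choose between the full 4-tuple and the duplicated pair.
import Mathlib
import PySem

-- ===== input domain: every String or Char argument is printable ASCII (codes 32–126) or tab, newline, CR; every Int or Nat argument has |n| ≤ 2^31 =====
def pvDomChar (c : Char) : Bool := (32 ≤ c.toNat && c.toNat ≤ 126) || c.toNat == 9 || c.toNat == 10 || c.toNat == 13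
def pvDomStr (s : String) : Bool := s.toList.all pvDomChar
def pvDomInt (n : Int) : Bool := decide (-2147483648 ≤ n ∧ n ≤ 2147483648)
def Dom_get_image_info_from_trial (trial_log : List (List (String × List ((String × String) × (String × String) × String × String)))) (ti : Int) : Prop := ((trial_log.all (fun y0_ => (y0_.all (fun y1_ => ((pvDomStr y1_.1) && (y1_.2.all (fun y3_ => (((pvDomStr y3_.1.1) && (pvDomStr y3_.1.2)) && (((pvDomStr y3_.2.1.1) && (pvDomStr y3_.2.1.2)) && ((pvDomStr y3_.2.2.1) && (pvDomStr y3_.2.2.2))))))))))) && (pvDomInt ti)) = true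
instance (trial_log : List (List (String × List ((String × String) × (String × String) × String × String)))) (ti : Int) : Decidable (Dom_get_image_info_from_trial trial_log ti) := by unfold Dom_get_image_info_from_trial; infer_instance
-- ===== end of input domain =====

-- ===== PORT A =====
-- B replaces A's backward recursion by: normalise the index once, find-first scan over a
-- precomputed descending range for the nearest qualifying trial, one unpack, hit==start test.
-- Alternative decomposition, same return value, not faster.
-- A's non-structural recursion on a decreasing Int index is ported with an explicit fuel that
-- is large enough on every input Pre_ admits.
def goA (trial_log : List (List (String × List ((String × String) × (String × String) × String × String)))) :
    Nat → Int → String × String × String × String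
  | 0, _ => ("", "", "", "")
  | fuel + 1, ti =>
    if ti = -1 then ("", "", "", "")          -- Python: raise RuntimeError
    else
      match PySem.List.pyGet? trial_log ti with
      | none => ("", "", "", "")              -- Python: IndexError
      | some trial =>
        match List.lookup "stimulus_changes" trial with
        | none => ("", "", "", "")            -- Python: KeyError
        | some changes =>
          if changes.length = 1 then
            match PySem.List.pyGet? changes 0 with
            | some ((fg, fn), (tg, tn), _, _) => (fg, fn, tg, tn)
            | none => ("", "", "", "")
          else
            let r := goA trial_log fuel (ti - 1)
            (r.2.2.1, r.2.2.2, r.2.2.1, r.2.2.2)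

def get_image_info_from_trial (trial_log : List (List (String × List ((String × String) × (String × String) × String × String)))) (ti : Int) : String × String × String × String :=
  goA trial_log (trial_log.length + ti.toNat + 2) ti

-- ===== PORT B =====
-- whether trial j qualifies: len(trial_log[j]["stimulus_changes"]) == 1
-- (missing index / key is Python's IndexError / KeyError, outside Pre_; false here)
def bQual (trial_log : List (List (String × List ((String × String) × (String × String) × String × String)))) (j : Nat) : Bool :=
  match trial_log[j]? with
  | some trial =>
    match List.lookup "stimulus_changes" trial with
    | some changes => changes.length == 1
    | none => false
  | none => false

def get_image_info_from_trial_alt (trial_log : List (List (String × List ((String × String) × (String × String) × String × String)))) (ti : Int) : String × String × String × String :=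
  if ti = -1 then ("", "", "", "")            -- Python: raise RuntimeError
  else
    let start : Int := if 0 ≤ ti then ti else ti + trial_log.length
    -- next((j for j in reversed(range(start + 1)) if …), None)
    match ((List.range (start + 1).toNat).reverse).find? (bQual trial_log) with
    | none => ("", "", "", "")                -- Python: raise RuntimeError
    | some hit =>
      match trial_log[hit]? with
      | some trial =>
        match List.lookup "stimulus_changes" trial with
        | some changes =>
          match changes[0]? with
          | some ((from_group, from_name), (to_group, to_name), _, _) =>
            if (hit : Int) = start then (from_group, from_name, to_group, to_name)
            else (to_group, to_name, to_group, to_name)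
          | none => ("", "", "", "")
        | none => ("", "", "", "")
      | none => ("", "", "", "")

-- ===== PRECONDITION & SPEC =====
-- length of trial i's "stimulus_changes" list, none where Python would raise Index/KeyError
def pvChg (trial_log : List (List (String × List ((String × String) × (String × String) × String × String)))) (i : Nat) : Option Nat :=
  (trial_log[i]?.bind (List.lookup "stimulus_changes")).map List.length

-- Pre_ excludes exactly the inputs on which Python A raises: ti = -1 (explicit RuntimeError),
-- ti out of range after Python's negative-index normalisation (IndexError), a visited trial
-- without the "stimulus_changes" key (KeyError), and backward exhaustion with no trial whose
-- change list has length 1 (RuntimeError / IndexError).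
def Pre_get_image_info_from_trial (trial_log : List (List (String × List ((String × String) × (String × String) × String × String)))) (ti : Int) : Prop :=
  ti ≠ -1 ∧
  0 ≤ (if ti < 0 then ti + trial_log.length else ti) ∧
  (if ti < 0 then ti + trial_log.length else ti) < trial_log.length ∧
  ∃ j ∈ List.range ((if ti < 0 then ti + (trial_log.length : Int) else ti).toNat + 1),
    pvChg trial_log j = some 1 ∧
    ∀ i ∈ List.range ((if ti < 0 then ti + (trial_log.length : Int) else ti).toNat + 1),
      j < i → ∃ m, pvChg trial_log i = some m ∧ m ≠ 1
instance (trial_log : List (List (String × List ((String × String) × (String × String) × String × String)))) (ti : Int) : Decidable (Pre_get_image_info_from_trial trial_log ti) := by unfold Pre_get_image_info_from_trial; infer_instance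

def pvWitness_get_image_info_from_trial : (List (List (String × List ((String × String) × (String × String) × String × String)))) × Int :=
  ([[("stimulus_changes", [(("grA", "imA"), ("grB", "imB"), "0.1", "7")])],
    [("stimulus_changes", [])]], 1)

def Spec_get_image_info_from_trial (trial_log : List (List (String × List ((String × String) × (String × String) × String × String)))) (ti : Int) (out : String × String × String × String) : Prop := out = get_image_info_from_trial_alt trial_log ti
instance (trial_log : List (List (String × List ((String × String) × (String × String) × String × String)))) (ti : Int) (out : String × String × String × String) : Decidable (Spec_get_image_info_from_trial trial_log ti out) := by unfold Spec_get_image_info_from_trial; infer_instance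

-- ===== CLAIM (what is proved, stated in full; the proofs are below) =====
def Claim_equal_get_image_info_from_trial : Prop := ∀ (trial_log : List (List (String × List ((String × String) × (String × String) × String × String)))) (ti : Int), Dom_get_image_info_from_trial trial_log ti → Pre_get_image_info_from_trial trial_log ti → Spec_get_image_info_from_trial trial_log ti (get_image_info_from_trial trial_log ti)

-- ===== LEMMAS AND PROOFS =====
-- the two possible results once the qualifying trial j is known
def outFull (trial_log : List (List (String × List ((String × String) × (String × String) × String × String)))) (j : Nat) : String × String × String × String :=
  match (trial_log[j]?.bind (List.lookup "stimulus_changes")).bind (fun cs => cs[0]?) with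
  | some ((fg, fn), (tg, tn), _, _) => (fg, fn, tg, tn)
  | none => ("", "", "", "")

def outDup (trial_log : List (List (String × List ((String × String) × (String × String) × String × String)))) (j : Nat) : String × String × String × String :=
  match (trial_log[j]?.bind (List.lookup "stimulus_changes")).bind (fun cs => cs[0]?) with
  | some ((_, _), (tg, tn), _, _) => (tg, tn, tg, tn)
  | none => ("", "", "", "")

theorem dup_outFull (trial_log : List (List (String × List ((String × String) × (String × String) × String × String)))) (j : Nat) :
    ((outFull trial_log j).2.2.1, (outFull trial_log j).2.2.2,
     (outFull trial_log j).2.2.1, (outFull trial_log j).2.2.2) = outDup trial_log j := by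
  unfold outFull outDup
  rcases (trial_log[j]?.bind (List.lookup "stimulus_changes")).bind (fun cs => cs[0]?) with _ | ⟨⟨fg, fn⟩, ⟨tg, tn⟩, x, y⟩ <;> rfl

theorem dup_outDup (trial_log : List (List (String × List ((String × String) × (String × String) × String × String)))) (j : Nat) :
    ((outDup trial_log j).2.2.1, (outDup trial_log j).2.2.2,
     (outDup trial_log j).2.2.1, (outDup trial_log j).2.2.2) = outDup trial_log j := by
  unfold outDup
  rcases (trial_log[j]?.bind (List.lookup "stimulus_changes")).bind (fun cs => cs[0]?) with _ | ⟨⟨fg, fn⟩, ⟨tg, tn⟩, x, y⟩ <;> rfl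

theorem bQual_iff (trial_log : List (List (String × List ((String × String) × (String × String) × String × String)))) (j : Nat) :
    bQual trial_log j = true ↔ pvChg trial_log j = some 1 := by
  unfold bQual pvChg
  rcases trial_log[j]? with _ | trial
  · simp
  · rcases hl : List.lookup "stimulus_changes" trial with _ | changes <;> simp [hl]

-- find-first over a reversed range returns the maximal qualifying index
theorem find?_desc (p : Nat → Bool) :
    ∀ (N j : Nat), j ≤ N → p j = true → (∀ i, j < i → i ≤ N → p i = false) →
      ((List.range (N + 1)).reverse).find? p = some j := by
  intro N
  induction N with
  | zero =>
    intro j hj hp _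
    interval_cases j
    simp [List.range_succ, hp]
  | succ N ih =>
    intro j hj hp hfalse
    rw [List.range_succ]
    by_cases hje : j = N + 1
    · subst hje; simp [hp]
    · have hjN : j ≤ N := by omega
      have hN1 : p (N + 1) = false := hfalse _ (by omega) (by omega)
      simp only [List.reverse_append, List.reverse_singleton, List.singleton_append,
        List.find?, hN1]
      exact ih j hjN hp (fun i h1 h2 => hfalse i h1 (by omega))

-- characterisation of A's fuel recursion along the (normalised) backward path
theorem goA_main (trial_log : List (List (String × List ((String × String) × (String × String) × String × String)))) (j : Nat)
    (h1 : pvChg trial_log j = some 1) :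
    ∀ (k : Nat) (fuel : Nat) (o : Int), k < fuel →
      (∀ i : Nat, i ≤ k → (i : Int) + o ≠ -1) →
      (∀ i : Nat, i ≤ k → PySem.List.pyGet? trial_log ((i : Int) + o) = trial_log[i]?) →
      j ≤ k →
      (∀ i : Nat, j < i → i ≤ k → ∃ m, pvChg trial_log i = some m ∧ m ≠ 1) →
      goA trial_log fuel ((k : Int) + o) = (if k = j then outFull trial_log j else outDup trial_log j) := by
  intro k
  induction k with
  | zero =>
    intro fuel o hfuel hne hget hj _
    obtain ⟨f, rfl⟩ : ∃ f, fuel = f + 1 := ⟨fuel - 1, by omega⟩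
    have hj0 : j = 0 := by omega
    subst hj0
    obtain ⟨changes, hch, hlen⟩ : ∃ cs, trial_log[0]?.bind (List.lookup "stimulus_changes") = some cs ∧ cs.length = 1 := by
      unfold pvChg at h1
      rcases hcs : trial_log[0]?.bind (List.lookup "stimulus_changes") with _ | cs
      · rw [hcs] at h1; simp at h1
      · rw [hcs] at h1; simp at h1; exact ⟨cs, rfl, h1⟩
    rcases htr : trial_log[0]? with _ | trial
    · rw [htr] at hch; simp at hch
    · rw [htr] at hch; simp at hch
      obtain ⟨c, rfl⟩ := List.length_eq_one_iff.mp hlen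
      simp only [goA, hne 0 le_rfl, hget 0 le_rfl, htr, hch,
        PySem.List.pyGet?_zero]
      rcases c with ⟨⟨fg, fn⟩, ⟨tg, tn⟩, x, y⟩
      simp [outFull, htr, hch]
  | succ k ih =>
    intro fuel o hfuel hne hget hj hfalse
    obtain ⟨f, rfl⟩ : ∃ f, fuel = f + 1 := ⟨fuel - 1, by omega⟩
    by_cases hje : j = k + 1
    · -- the first trial examined qualifies
      subst hje
      obtain ⟨changes, hch, hlen⟩ : ∃ cs, trial_log[k + 1]?.bind (List.lookup "stimulus_changes") = some cs ∧ cs.length = 1 := by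
        unfold pvChg at h1
        rcases hcs : trial_log[k + 1]?.bind (List.lookup "stimulus_changes") with _ | cs
        · rw [hcs] at h1; simp at h1
        · rw [hcs] at h1; simp at h1; exact ⟨cs, rfl, h1⟩
      rcases htr : trial_log[k + 1]? with _ | trial
      · rw [htr] at hch; simp at hch
      · rw [htr] at hch; simp at hch
        obtain ⟨c, rfl⟩ := List.length_eq_one_iff.mp hlen
        simp only [goA, hne (k + 1) le_rfl, hget (k + 1) le_rfl, htr, hch,
          PySem.List.pyGet?_zero]
        rcases c with ⟨⟨fg, fn⟩, ⟨tg, tn⟩, x, y⟩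
        simp [outFull, htr, hch]
    · -- step back: this trial has a change list of some length m ≠ 1
      obtain ⟨m, hm, hm1⟩ := hfalse (k + 1) (by omega) le_rfl
      obtain ⟨changes, hch, hlen⟩ : ∃ cs, trial_log[k + 1]?.bind (List.lookup "stimulus_changes") = some cs ∧ cs.length = m := by
        unfold pvChg at hm
        rcases hcs : trial_log[k + 1]?.bind (List.lookup "stimulus_changes") with _ | cs
        · rw [hcs] at hm; simp at hm
        · rw [hcs] at hm; simp at hm; exact ⟨cs, rfl, hm⟩
      rcases htr : trial_log[k + 1]? with _ | trial
      · rw [htr] at hch; simp at hch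
      · rw [htr] at hch; simp at hch
        have hstep : ((k + 1 : Nat) : Int) + o - 1 = (k : Int) + o := by push_cast; ring
        have hrec := ih f o (by omega)
          (fun i hi => hne i (by omega)) (fun i hi => hget i (by omega)) (by omega)
          (fun i h1 h2 => hfalse i h1 (by omega))
        simp only [goA, hne (k + 1) le_rfl, hget (k + 1) le_rfl, htr, hch,
          if_neg (by omega : ¬ changes.length = 1), hstep, hrec]
        simp only [if_false]
        have hne2 : ¬ k + 1 = j := fun h => hje h.symm
        by_cases hkj : k = j
        · rw [if_pos hkj, dup_outFull, if_neg hne2]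
        · rw [if_neg hkj, dup_outDup, if_neg hne2]

-- ===== VERDICT (by name: the statement is the Claim_ definition above) =====
theorem get_image_info_from_trial_spec : Claim_equal_get_image_info_from_trial := by
  intro trial_log ti _ hpre
  obtain ⟨hne1, h0, hlt, j, hjmem, hj1, hjmax⟩ := hpre
  unfold Spec_get_image_info_from_trial get_image_info_from_trial get_image_info_from_trial_alt
  set n := trial_log.length with hn
  set norm : Int := if ti < 0 then ti + n else ti with hnorm
  set k : Nat := norm.toNat with hk
  have hkn : (k : Int) = norm := by omega
  have hjk : j ≤ k := by
    have := List.mem_range.mp hjmem; omega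
  have hjmax' : ∀ i : Nat, j < i → i ≤ k → ∃ m, pvChg trial_log i = some m ∧ m ≠ 1 := by
    intro i h1 h2
    exact hjmax i (List.mem_range.mpr (by omega)) h1
  -- A's side
  have hA : goA trial_log (n + ti.toNat + 2) ti = (if k = j then outFull trial_log j else outDup trial_log j) := by
    by_cases hsign : ti < 0
    · -- negative ti: trial i on the path is trial_log[i - n], ti = k - n
      have hti2 : ti ≤ -2 := by
        rcases lt_or_ge ti (-1) with h | h
        · omega
        · omega
      have hknorm : norm = ti + n := by rw [hnorm, if_pos hsign]
      have hknn : k < n := by omega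
      have hkub : (k : Int) ≤ n - 2 := by omega
      have hti : ti = (k : Int) + (-(n : Int)) := by omega
      rw [hti]
      apply goA_main trial_log j hj1 k _ (-(n : Int)) (by omega)
      · intro i hi; omega
      · intro i hi
        have hin : i < n := by omega
        have : (i : Int) + -(n : Int) = -(((n - i : Nat) : Int)) := by omega
        rw [this, PySem.List.pyGet?_neg_natCast trial_log (n - i) (by omega) (by omega)]
        congr 1
        omega
      · exact hjk
      · exact hjmax'
    · -- nonnegative ti: ti = k, offset 0
      have hknorm : norm = ti := by rw [hnorm, if_neg hsign]
      have hti : ti = (k : Int) + 0 := by omega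
      rw [hti]
      apply goA_main trial_log j hj1 k _ 0 (by omega)
      · intro i hi; omega
      · intro i hi; rw [add_zero]; exact PySem.List.pyGet?_natCast trial_log i
      · exact hjk
      · exact hjmax'
  rw [hA, if_neg hne1]
  -- B's side
  have hstart : (if 0 ≤ ti then ti else ti + (n : Int)) = norm := by
    rw [hnorm]; split_ifs <;> omega
  rw [hstart]
  have hrange : (norm + 1).toNat = k + 1 := by omega
  simp only [hrange]
  have hfind : ((List.range (k + 1)).reverse).find? (bQual trial_log) = some j := by
    apply find?_desc (bQual trial_log) k j hjk ((bQual_iff trial_log j).mpr hj1)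
    intro i h1 h2
    obtain ⟨m, hm, hm1⟩ := hjmax' i h1 h2
    rcases hb : bQual trial_log i with _ | _
    · rfl
    · rw [(bQual_iff trial_log i).mp hb] at hm
      simp at hm; omega
  rw [hfind]
  obtain ⟨changes, hch, hlen⟩ : ∃ cs, trial_log[j]?.bind (List.lookup "stimulus_changes") = some cs ∧ cs.length = 1 := by
    unfold pvChg at hj1
    rcases hcs : trial_log[j]?.bind (List.lookup "stimulus_changes") with _ | cs
    · rw [hcs] at hj1; simp at hj1
    · rw [hcs] at hj1; simp at hj1; exact ⟨cs, rfl, hj1⟩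
  rcases htr : trial_log[j]? with _ | trial
  · rw [htr] at hch; simp at hch
  · rw [htr] at hch; simp at hch
    obtain ⟨c, rfl⟩ := List.length_eq_one_iff.mp hlen
    rcases c with ⟨⟨fg, fn⟩, ⟨tg, tn⟩, x, y⟩
    simp only [htr, hch, List.getElem?_cons_zero]
    have hcond : ((j : Int) = norm) ↔ (k = j) := by omega
    by_cases hkj : k = j
    · rw [if_pos (hcond.mpr hkj), if_pos hkj]
      simp [outFull, htr, hch]
    · rw [if_neg (fun h => hkj (hcond.mp h)), if_neg hkj]
      simp [outDup, htr, hch]
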